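-- pv_equiv track=rewrite | github.com/Digital-Physics/algorithms | icd_codes.py | icd_counter3
-- ===== SOURCE A (Python) =====
-- from typing import List, Dict
-- from collections import defaultdict
--
-- def icd_counter3(list_of_lists: List[List[str]]) -> Dict[str, int]:
--     """graph analysis: list of fully connected graphs provided.
--     function counts the number of connected icd_codes for each icd_code node."""
--
--     node_defaultdict = defaultdict(lambda: [0, set()]) # icd_code: [icd connection count, set of node connection edges]
--
--     for icd_list in list_of_lists:
--         for relation_start in icd_list:
--             for relation_end in icd_list:
--                 curr_node = node_defaultdict[relation_start] # gets initalized ahead of time instead of creation and index at once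
--                 if relation_start != relation_end and relation_end not in curr_node[1]:
--                     curr_node[1].add(relation_end)
--                     curr_node[0] += 1
--
--     return {k: node_defaultdict[k][0] for k in node_defaultdict.keys()}
-- ===== SOURCE B (Python) =====
-- from typing import List, Dict
-- from collections import Counter
--
-- def icd_counter3(list_of_lists: List[List[str]]) -> Dict[str, int]:
--     order = []
--     seen = set()
--     edges = set()
--     for icd_list in list_of_lists:
--         members = list(dict.fromkeys(icd_list))
--         for code in members:
--             if code not in seen:
--                 seen.add(code)
--                 order.append(code)
--         edges.update((a, b) for a in members for b in members if a != b)
--     deg = Counter(a for a, _ in edges)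
--     return {k: deg[k] for k in order}
-- ===== Notes on version B (the rewrite author's own statement) =====
-- stated objective: alternative
-- what changed: Instead of A's per-node records (running count + neighbor set updated inside a triple nested loop), B runs staged passes over one global data structure: per list it dedups the members once, pours all distinct directed co-occurrence pairs into a single global edge set while recording first-occurrence key order, then derives every count at the end as the node's out-degree via one Counter pass over the edge set.
import Mathlib
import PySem

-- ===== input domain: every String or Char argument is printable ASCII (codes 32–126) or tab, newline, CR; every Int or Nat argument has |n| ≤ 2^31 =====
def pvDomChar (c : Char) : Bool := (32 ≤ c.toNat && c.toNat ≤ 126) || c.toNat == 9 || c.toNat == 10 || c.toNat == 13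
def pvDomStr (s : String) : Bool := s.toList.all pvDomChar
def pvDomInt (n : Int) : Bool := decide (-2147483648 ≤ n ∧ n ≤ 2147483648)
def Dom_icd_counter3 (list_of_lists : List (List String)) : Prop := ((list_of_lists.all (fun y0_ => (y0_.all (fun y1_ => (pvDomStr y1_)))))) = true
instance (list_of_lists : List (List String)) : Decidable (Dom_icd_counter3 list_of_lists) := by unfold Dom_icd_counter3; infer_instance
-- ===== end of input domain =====

-- B replaces A's per-node running records (count + neighbor set maintained in a triple loop)
-- by staged passes over one global edge set: collect all distinct directed co-occurrence
-- edges and the first-occurrence key order, then count each node's out-degree at the end.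

-- ===== PORT A =====
def icd_counter3 (list_of_lists : List (List String)) : List (String × Int) :=
  let node_defaultdict : PySem.Dict String (Int × PySem.Set String) :=
    list_of_lists.foldl (fun d icd_list =>
      icd_list.foldl (fun d relation_start =>
        icd_list.foldl (fun d relation_end =>
          let curr_node := d.getD relation_start (0, PySem.Set.empty)
          if relation_start ≠ relation_end ∧ ¬ (relation_end ∈ curr_node.2) then
            d.insert relation_start (curr_node.1 + 1, PySem.Set.add curr_node.2 relation_end)
          else
            d.insert relation_start curr_node) d) d) PySem.Dict.empty
  node_defaultdict.keys.map (fun k => (k, (node_defaultdict.getD k (0, PySem.Set.empty)).1))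

-- ===== PORT B =====
-- the generator '(a, b) for a in members for b in members if a != b'
def pvEdgeList (members : List String) : List (String × String) :=
  members.flatMap (fun a => members.filterMap (fun b => if a ≠ b then some (a, b) else none))

def icd_counter3_alt (list_of_lists : List (List String)) : List (String × Int) :=
  let st : List String × PySem.Set String × PySem.Set (String × String) :=
    list_of_lists.foldl (fun st icd_list =>
      let (order, seen, edges) := st
      let members := PySem.List.dedup icd_list
      let (order, seen) := members.foldl (fun (p : List String × PySem.Set String) code =>
          if ¬ (code ∈ p.2) then (p.1 ++ [code], PySem.Set.add p.2 code) else p) (order, seen)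
      (order, seen, PySem.Set.update edges (pvEdgeList members)))
      ([], PySem.Set.empty, PySem.Set.empty)
  let deg : PySem.Dict String Int := PySem.Dict.counter (st.2.2.map (fun p => p.1))
  st.1.map (fun k => (k, deg.getD k 0))

-- ===== PRECONDITION & SPEC =====
def Spec_icd_counter3 (list_of_lists : List (List String)) (out : List (String × Int)) : Prop := out = icd_counter3_alt list_of_lists
instance (list_of_lists : List (List String)) (out : List (String × Int)) : Decidable (Spec_icd_counter3 list_of_lists out) := by unfold Spec_icd_counter3; infer_instance

-- ===== CLAIM (what is proved, stated in full; the proofs are below) =====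
def Claim_equal_icd_counter3 : Prop := ∀ (list_of_lists : List (List String)), Dom_icd_counter3 list_of_lists → Spec_icd_counter3 list_of_lists (icd_counter3 list_of_lists)

-- ===== LEMMAS AND PROOFS =====

-- the shape of every value A stores: (len s, s)
def pvMk (s : PySem.Set String) : Int × PySem.Set String := (PySem.Set.len s, s)

-- A's innermost step, factored
def pvStepA (st : String) (d : PySem.Dict String (Int × PySem.Set String)) (e : String) :
    PySem.Dict String (Int × PySem.Set String) :=
  if st ≠ e ∧ ¬ (e ∈ (d.getD st (0, PySem.Set.empty)).2) then
    d.insert st ((d.getD st (0, PySem.Set.empty)).1 + 1,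
      PySem.Set.add (d.getD st (0, PySem.Set.empty)).2 e)
  else d.insert st (d.getD st (0, PySem.Set.empty))

def pvStepV (st : String) (v : Int × PySem.Set String) (e : String) : Int × PySem.Set String :=
  if st ≠ e ∧ ¬ (e ∈ v.2) then (v.1 + 1, PySem.Set.add v.2 e) else v

lemma pvStepA_eq (st : String) (d : PySem.Dict String (Int × PySem.Set String)) (e : String) :
    pvStepA st d e = d.insert st (pvStepV st (d.getD st (0, PySem.Set.empty)) e) := by
  unfold pvStepA pvStepV
  split_ifs <;> rfl

lemma pvFoldl_stepA_insert (st : String) (ends : List String) :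
    ∀ (v : Int × PySem.Set String) (d : PySem.Dict String (Int × PySem.Set String)),
    ends.foldl (pvStepA st) (d.insert st v) = d.insert st (ends.foldl (pvStepV st) v) := by
  induction ends with
  | nil => intro v d; rfl
  | cons e rest ih =>
    intro v d
    have h1 : pvStepA st (d.insert st v) e = d.insert st (pvStepV st v e) := by
      rw [pvStepA_eq, PySem.Dict.getD_insert_self, PySem.Dict.insert_insert_self]
    simp only [List.foldl_cons, h1, ih]

lemma pvInnerA_cons (st e : String) (rest : List String)
    (d : PySem.Dict String (Int × PySem.Set String)) :
    (e :: rest).foldl (pvStepA st) d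
      = d.insert st ((e :: rest).foldl (pvStepV st) (d.getD st (0, PySem.Set.empty))) := by
  simp only [List.foldl_cons, pvStepA_eq]
  exact pvFoldl_stepA_insert st rest _ d

lemma pvStepV_pair (st : String) (s : PySem.Set String) (e : String) :
    pvStepV st (pvMk s) e = pvMk (if st ≠ e then s.add e else s) := by
  unfold pvStepV pvMk
  by_cases h1 : st = e
  · simp [h1]
  · by_cases h2 : e ∈ s
    · simp [h1, h2]
    · simp [h1, h2, PySem.Set.len]

lemma pvFoldl_stepV (st : String) (ends : List String) :
    ∀ s : PySem.Set String,
    ends.foldl (pvStepV st) (pvMk s)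
      = pvMk (ends.foldl (fun s e => if st ≠ e then PySem.Set.add s e else s) s) := by
  induction ends with
  | nil => intro s; rfl
  | cons e rest ih =>
    intro s
    simp only [List.foldl_cons, pvStepV_pair, ih]

lemma pvSkipfold_eq_update (st : String) (ends : List String) :
    ∀ s : PySem.Set String,
    ends.foldl (fun s e => if st ≠ e then PySem.Set.add s e else s) s
      = PySem.Set.update s (ends.filter (fun e => !(e == st))) := by
  induction ends with
  | nil => intro s; rfl
  | cons e rest ih =>
    intro s
    simp only [List.foldl_cons, List.filter_cons]
    by_cases h : st = e
    · subst h
      rw [if_neg (by simp), if_neg (by simp)]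
      exact ih s
    · have hne : (e == st) = false := beq_eq_false_iff_ne.mpr (Ne.symm h)
      rw [if_pos h, if_pos (by simp [hne])]
      rw [PySem.Set.update_cons]
      exact ih (s.add e)

lemma pvOfList_filter (p : String → Bool) (xs : List String) :
    PySem.Set.ofList (xs.filter p) = (PySem.Set.ofList xs).filter p := by
  induction xs with
  | nil => rfl
  | cons x xs ih =>
    by_cases hp : p x = true
    · rw [List.filter_cons_of_pos hp, PySem.Set.ofList_cons, PySem.Set.ofList_cons, ih]
      simp only [PySem.Set.discard, List.filter_cons_of_pos hp]
      rw [List.filter_comm]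
    · rw [List.filter_cons_of_neg (by simp [hp]), PySem.Set.ofList_cons, ih]
      rw [List.filter_cons_of_neg (by simp [hp])]
      simp only [PySem.Set.discard]
      rw [List.filter_comm]
      symm
      apply List.filter_eq_self.mpr
      intro y hy
      have hyp : p y = true := (List.mem_filter.mp hy).2
      have : y ≠ x := by rintro rfl; rw [hyp] at hp; exact hp rfl
      simp [this]

lemma pvDiff_single (xs : List String) (n : String) :
    PySem.Set.diff (PySem.Set.ofList xs) (PySem.Set.ofList [n])
      = (PySem.Set.ofList xs).filter (fun e => !(e == n)) := by
  have h1 : PySem.Set.ofList [n] = [n] := rfl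
  rw [h1]
  simp only [PySem.Set.diff]
  apply List.filter_congr
  intro x _
  by_cases hx : x = n <;> simp [PySem.Set.contains, hx]

-- A's inner loop over a whole list, as a union with set(ends) - {st}
lemma pvValue_fold (st : String) (ends : List String) (s : PySem.Set String) :
    ends.foldl (pvStepV st) (pvMk s)
      = pvMk (PySem.Set.union s (PySem.Set.diff (PySem.Set.ofList ends) (PySem.Set.ofList [st]))) := by
  rw [pvFoldl_stepV, pvSkipfold_eq_update]
  congr 1
  rw [pvDiff_single]
  show PySem.Set.update s (ends.filter (fun e => !(e == st)))
    = PySem.Set.update s ((PySem.Set.ofList ends).filter (fun e => !(e == st)))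
  rw [PySem.Set.update_eq_append_filter, PySem.Set.update_eq_append_filter]
  congr 1
  rw [pvOfList_filter, pvOfList_filter, PySem.Set.ofList_ofList]

lemma pvUnion_absorb (u : PySem.Set String) (t : List String) (h : ∀ x ∈ t, x ∈ u) :
    PySem.Set.union u t = u := by
  show PySem.Set.update u t = u
  rw [PySem.Set.update_eq_append_filter]
  have : (PySem.Set.ofList t).filter (fun y => !(PySem.Set.contains u y)) = [] := by
    rw [List.filter_eq_nil_iff]
    intro y hy
    have hyu := h y ((PySem.Set.mem_ofList t y).mp hy)
    simp [hyu]
  rw [this, List.append_nil]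

lemma pvUnion_idem (s : PySem.Set String) (t : List String) :
    PySem.Set.union (PySem.Set.union s t) t = PySem.Set.union s t := by
  apply pvUnion_absorb
  intro x hx
  exact (PySem.Set.mem_union s t x).mpr (Or.inr hx)

-- the mk-shape hypothesis on a dict
def pvMkShape (d : PySem.Dict String (Int × PySem.Set String)) : Prop :=
  ∀ k c s, d.get? k = some (c, s) → (c, s) = pvMk s

lemma pvGetD_mk {d : PySem.Dict String (Int × PySem.Set String)} (h : pvMkShape d) (k : String) :
    d.getD k (0, PySem.Set.empty) = pvMk (d.getD k (0, PySem.Set.empty)).2 := by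
  rw [PySem.Dict.getD_eq_get?_getD]
  cases hg : d.get? k with
  | none => rfl
  | some v =>
    obtain ⟨c, s⟩ := v
    simpa using h k c s hg

-- the neighbor set A holds at k after processing list L, given d's prior value
def pvNewSet (d : PySem.Dict String (Int × PySem.Set String)) (L : List String) (k : String) :
    PySem.Set String :=
  PySem.Set.union (d.getD k (0, PySem.Set.empty)).2
    (PySem.Set.diff (PySem.Set.ofList L) (PySem.Set.ofList [k]))

-- A's middle fold (over relation_start) for one list L, fully characterised
lemma pvMid (L : List String) (hL : L ≠ []) :
    ∀ (starts : List String) (d : PySem.Dict String (Int × PySem.Set String)),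
      d.keys.Nodup → pvMkShape d →
      (starts.foldl (fun d st => L.foldl (pvStepA st) d) d).keys = PySem.Set.update d.keys starts ∧
      (starts.foldl (fun d st => L.foldl (pvStepA st) d) d).keys.Nodup ∧
      ∀ k, (starts.foldl (fun d st => L.foldl (pvStepA st) d) d).get? k
        = if k ∈ starts then some (pvMk (pvNewSet d L k)) else d.get? k := by
  obtain ⟨x, xs, rfl⟩ := List.exists_cons_of_ne_nil hL
  intro starts
  induction starts with
  | nil =>
    intro d hnd _
    refine ⟨by simp [PySem.Set.update_nil], hnd, ?_⟩
    intro k; simp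
  | cons a rest ih =>
    intro d hnd hmk
    have hstep : (x :: xs).foldl (pvStepA a) d = d.insert a (pvMk (pvNewSet d (x :: xs) a)) := by
      rw [pvInnerA_cons, pvGetD_mk hmk a, pvValue_fold]
      rfl
    set d1 := d.insert a (pvMk (pvNewSet d (x :: xs) a)) with hd1
    have hnd1 : d1.keys.Nodup := PySem.Dict.nodup_keys_insert d a _ hnd
    have hmk1 : pvMkShape d1 := by
      intro k c s hg
      by_cases hk : k = a
      · subst hk
        rw [hd1, PySem.Dict.get?_insert_self, Option.some_inj] at hg
        rw [← hg]
        exact congrArg pvMk (show pvNewSet d (x :: xs) k = s from congrArg Prod.snd hg)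
      · rw [hd1, PySem.Dict.get?_insert_of_ne _ _ hk] at hg
        exact hmk k c s hg
    have hkeys1 : d1.keys = PySem.Set.add d.keys a := by
      rw [PySem.Set.add_eq_ite]
      by_cases hc : a ∈ d.keys
      · rw [if_pos hc, hd1, PySem.Dict.keys_insert_of_contains d _ ((PySem.Dict.contains_iff_mem_keys d a).mpr hc)]
      · rw [if_neg hc, hd1, PySem.Dict.keys_insert_of_not_contains d _ (by
          cases hcc : d.contains a with
          | false => rfl
          | true => exact absurd ((PySem.Dict.contains_iff_mem_keys d a).mp hcc) hc)]
    obtain ⟨ihk, ihn, ihg⟩ := ih d1 hnd1 hmk1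
    have hsplit : List.foldl (fun d st => List.foldl (pvStepA st) d (x :: xs)) d (a :: rest)
        = List.foldl (fun d st => List.foldl (pvStepA st) d (x :: xs)) d1 rest :=
      congrArg (fun dd => List.foldl (fun d st => List.foldl (pvStepA st) d (x :: xs)) dd rest) hstep
    rw [hsplit]
    refine ⟨by rw [ihk, hkeys1, PySem.Set.update_cons], ihn, ?_⟩
    intro k
    rw [ihg k]
    by_cases hk : k = a
    · subst hk
      by_cases hr : k ∈ rest
      · rw [if_pos hr, if_pos (by simp)]
        congr 2
        show pvNewSet d1 (x :: xs) k = pvNewSet d (x :: xs) k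
        unfold pvNewSet
        rw [hd1, PySem.Dict.getD_insert_self]
        show PySem.Set.union (PySem.Set.union _ _) _ = _
        exact pvUnion_idem _ _
      · rw [if_neg hr, if_pos (by simp), hd1, PySem.Dict.get?_insert_self]
    · have hgd : d1.getD k (0, PySem.Set.empty) = d.getD k (0, PySem.Set.empty) := by
        rw [hd1, PySem.Dict.getD_eq_get?_getD, PySem.Dict.get?_insert_of_ne _ _ hk,
          ← PySem.Dict.getD_eq_get?_getD]
      by_cases hr : k ∈ rest
      · rw [if_pos hr, if_pos (by simp [hr])]
        congr 2
        unfold pvNewSet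
        rw [hgd]
      · rw [if_neg hr, if_neg (by simp [hk, hr]), hd1, PySem.Dict.get?_insert_of_ne _ _ hk]

-- membership in the edge comprehension
lemma pvMem_edgeList (L : List String) (p : String × String) :
    p ∈ pvEdgeList L ↔ p.1 ∈ L ∧ p.2 ∈ L ∧ p.1 ≠ p.2 := by
  obtain ⟨a, b⟩ := p
  unfold pvEdgeList
  simp only [List.mem_flatMap, List.mem_filterMap]
  constructor
  · rintro ⟨x, hx, y, hy, hsome⟩
    by_cases hxy : x = y
    · simp [hxy] at hsome
    · rw [if_pos hxy] at hsome
      obtain ⟨rfl, rfl⟩ := Prod.mk.injEq .. ▸ Option.some.injEq .. ▸ hsome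
      exact ⟨hx, hy, hxy⟩
  · rintro ⟨ha, hb, hne⟩
    exact ⟨a, ha, b, hb, by rw [if_pos hne]⟩

lemma pvMem_edgeList_dedup (L : List String) (p : String × String) :
    p ∈ pvEdgeList (PySem.List.dedup L) ↔ p.1 ∈ L ∧ p.2 ∈ L ∧ p.1 ≠ p.2 := by
  rw [pvMem_edgeList (PySem.List.dedup L) p]
  simp

lemma pvUpdate_dedup {α : Type} [BEq α] [LawfulBEq α] (s : PySem.Set α) (L : List α) :
    PySem.Set.update s (PySem.List.dedup L) = PySem.Set.update s L := by
  rw [PySem.Set.update_eq_append_filter, PySem.Set.update_eq_append_filter,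
    PySem.List.dedup_eq_ofList, PySem.Set.ofList_ofList]

-- the invariant tying A's dict to B's (order, edges) state
def pvInv (d : PySem.Dict String (Int × PySem.Set String)) (order : List String)
    (edges : PySem.Set (String × String)) : Prop :=
  d.keys = order ∧ d.keys.Nodup ∧ edges.Nodup ∧
  (∀ p ∈ edges, p.1 ∈ order) ∧
  (∀ k c s, d.get? k = some (c, s) →
    c = PySem.Set.len s ∧ s.Nodup ∧ (∀ b, (k, b) ∈ edges ↔ b ∈ s))

lemma pvInv_mkShape {d : PySem.Dict String (Int × PySem.Set String)} {order : List String}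
    {edges : PySem.Set (String × String)} (h : pvInv d order edges) : pvMkShape d := by
  intro k c s hg
  have := (h.2.2.2.2 k c s hg).1
  simp [pvMk, this]

-- one whole list preserves the invariant
lemma pvListStep (L : List String) (d : PySem.Dict String (Int × PySem.Set String))
    (order : List String) (edges : PySem.Set (String × String)) (h : pvInv d order edges) :
    pvInv (L.foldl (fun d st => L.foldl (pvStepA st) d) d)
      (PySem.Set.update order (PySem.List.dedup L))
      (PySem.Set.update edges (pvEdgeList (PySem.List.dedup L))) := by
  rw [pvUpdate_dedup order L]
  obtain ⟨hko, hnd, hne, hfst, hval⟩ := h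
  cases hLnil : L with
  | nil =>
    simpa [PySem.Set.update_nil, pvEdgeList, PySem.List.dedup] using ⟨hko, hnd, hne, hfst, hval⟩
  | cons x xs =>
    rw [← hLnil]
    have hL : L ≠ [] := by rw [hLnil]; simp
    obtain ⟨hkeys, hnd', hget⟩ := pvMid L hL L d hnd (pvInv_mkShape ⟨hko, hnd, hne, hfst, hval⟩)
    refine ⟨by rw [hkeys, hko], hnd', PySem.Set.nodup_update edges (pvEdgeList (PySem.List.dedup L)) hne, ?_, ?_⟩
    · intro p hp
      rcases (PySem.Set.mem_update edges (pvEdgeList (PySem.List.dedup L)) p).mp hp with hp | hp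
      · exact (PySem.Set.mem_update order L p.1).mpr (Or.inl (hfst p hp))
      · exact (PySem.Set.mem_update order L p.1).mpr (Or.inr ((pvMem_edgeList_dedup L p).mp hp).1)
    · intro k c s hg
      rw [hget k] at hg
      by_cases hkL : k ∈ L
      · rw [if_pos hkL] at hg
        have hcs : c = PySem.Set.len (pvNewSet d L k) ∧ s = pvNewSet d L k := by
          rw [Option.some_inj] at hg
          exact ⟨(congrArg Prod.fst hg).symm, (congrArg Prod.snd hg).symm⟩
        obtain ⟨rfl, rfl⟩ := hcs
        -- the old set stored at k: nodup, and it lists exactly the old edges out of k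
        have holdn : (d.getD k (0, PySem.Set.empty)).2.Nodup := by
          cases hgk : d.get? k with
          | none =>
            rw [PySem.Dict.getD_eq_get?_getD, hgk]
            exact List.nodup_nil
          | some v =>
            rw [PySem.Dict.getD_eq_get?_getD, hgk]
            exact (hval k v.1 v.2 (by rw [hgk])).2.1
        have holdm : ∀ b, ((k, b) ∈ edges ↔ b ∈ (d.getD k (0, PySem.Set.empty)).2) := by
          intro b
          cases hgk : d.get? k with
          | none =>
            have hk_not : k ∉ order := by
              rw [← hko]
              exact (PySem.Dict.get?_eq_none_iff_not_mem_keys d k).mp hgk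
            rw [PySem.Dict.getD_eq_get?_getD, hgk]
            exact ⟨fun hb => absurd (hfst (k, b) hb) hk_not,
                   fun hb => absurd hb (by simp [PySem.Set.empty])⟩
          | some v =>
            rw [PySem.Dict.getD_eq_get?_getD, hgk]
            exact (hval k v.1 v.2 (by rw [hgk])).2.2 b
        have hmemk : ∀ y : String, y ∈ PySem.Set.ofList [k] ↔ y = k := by
          intro y
          rw [PySem.Set.mem_ofList]
          exact List.mem_singleton
        refine ⟨rfl, PySem.Set.nodup_union _ _ holdn, ?_⟩
        intro b
        rw [PySem.Set.mem_update]
        unfold pvNewSet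
        rw [PySem.Set.mem_union, PySem.Set.mem_diff]
        constructor
        · rintro (hb | hb)
          · exact Or.inl ((holdm b).mp hb)
          · obtain ⟨_, hbL, hkb⟩ := (pvMem_edgeList_dedup L (k, b)).mp hb
            exact Or.inr ⟨(PySem.Set.mem_ofList L b).mpr hbL,
              fun hbk => hkb ((hmemk b).mp hbk).symm⟩
        · rintro (hb | ⟨hbL, hbk⟩)
          · exact Or.inl ((holdm b).mpr hb)
          · exact Or.inr ((pvMem_edgeList_dedup L (k, b)).mpr ⟨hkL, (PySem.Set.mem_ofList L b).mp hbL,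
              fun hkb => hbk ((hmemk b).mpr hkb.symm)⟩)
      · rw [if_neg hkL] at hg
        obtain ⟨hc, hsnd, hmemb⟩ := hval k c s hg
        refine ⟨hc, hsnd, ?_⟩
        intro b
        rw [PySem.Set.mem_update]
        constructor
        · rintro (hb | hb)
          · exact (hmemb b).mp hb
          · exact absurd ((pvMem_edgeList_dedup L (k, b)).mp hb).1 hkL
        · exact fun hb => Or.inl ((hmemb b).mpr hb)

-- B's order/seen fold, when seen is the order list itself
lemma pvSeen_fold (L : List String) :
    ∀ o : List String, o.Nodup →
    L.foldl (fun (p : List String × PySem.Set String) code =>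
        if ¬ (code ∈ p.2) then (p.1 ++ [code], PySem.Set.add p.2 code) else p) (o, o)
      = (PySem.Set.update o L, PySem.Set.update o L) := by
  induction L with
  | nil => intro o _; simp [PySem.Set.update_nil]
  | cons c rest ih =>
    intro o hnd
    simp only [List.foldl_cons]
    rw [PySem.Set.update_cons]
    by_cases hc : c ∈ o
    · rw [if_neg (by simpa using hc), PySem.Set.add_of_mem hc]
      exact ih o hnd
    · rw [if_pos (by simpa using hc)]
      have hadd : PySem.Set.add o c = o ++ [c] := PySem.Set.add_of_not_mem hc
      rw [show ((o ++ [c], PySem.Set.add o c) : List String × PySem.Set String)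
            = (PySem.Set.add o c, PySem.Set.add o c) by rw [hadd]]
      exact ih _ (PySem.Set.nodup_add o c hnd)

-- the combined outer fold: A's dict and B's triple stay related
lemma pvOuter (lls : List (List String)) :
    ∀ (d : PySem.Dict String (Int × PySem.Set String)) (order : List String)
      (edges : PySem.Set (String × String)), pvInv d order edges →
    ∃ order' edges',
      lls.foldl (fun st icd_list =>
        let (order, seen, edges) := st
        let members := PySem.List.dedup icd_list
        let (order, seen) := members.foldl (fun (p : List String × PySem.Set String) code =>
            if ¬ (code ∈ p.2) then (p.1 ++ [code], PySem.Set.add p.2 code) else p) (order, seen)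
        (order, seen, PySem.Set.update edges (pvEdgeList members))) (order, order, edges)
        = (order', order', edges') ∧
      pvInv (lls.foldl (fun d icd_list =>
        icd_list.foldl (fun d relation_start =>
          icd_list.foldl (pvStepA relation_start) d) d) d) order' edges' := by
  induction lls with
  | nil => intro d order edges h; exact ⟨order, edges, rfl, h⟩
  | cons L rest ih =>
    intro d order edges h
    have hnd : order.Nodup := h.1 ▸ h.2.1
    have hstep := pvSeen_fold (PySem.List.dedup L) order hnd
    obtain ⟨o', e', hb, hinv⟩ := ih _ _ _ (pvListStep L d order edges h)
    refine ⟨o', e', ?_, hinv⟩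
    simp only [List.foldl_cons, hstep]
    exact hb

-- out-degree in the edge set = size of the neighbor set
lemma pvCount (edges : PySem.Set (String × String)) (k : String) (s : PySem.Set String)
    (hne : edges.Nodup) (hsn : s.Nodup) (hmem : ∀ b, (k, b) ∈ edges ↔ b ∈ s) :
    (edges.map (fun p => p.1)).count k = s.length := by
  have h1 : (edges.map (fun p => p.1)).count k
      = (edges.filter (fun p => p.1 == k)).length := by
    rw [List.count_eq_countP, List.countP_map, List.countP_eq_length_filter]
    rfl
  set F := (edges.filter (fun p => p.1 == k)).map (fun p => p.2) with hF
  have hFlen : F.length = (edges.filter (fun p => p.1 == k)).length := by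
    rw [hF, List.length_map]
  have hFnd : F.Nodup := by
    apply List.Nodup.map_on
    · intro p hp q hq hpq
      have hpk : p.1 = k := by simpa using (List.mem_filter.mp hp).2
      have hqk : q.1 = k := by simpa using (List.mem_filter.mp hq).2
      exact Prod.ext (hpk.trans hqk.symm) hpq
    · exact hne.filter _
  have hFmem : ∀ b, b ∈ F ↔ b ∈ s := by
    intro b
    rw [hF]
    simp only [List.mem_map, List.mem_filter]
    constructor
    · rintro ⟨p, ⟨hp, hpk⟩, rfl⟩
      have : p = (k, p.2) := Prod.ext (by simpa using hpk) rfl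
      exact (hmem p.2).mp (this ▸ hp)
    · intro hb
      exact ⟨(k, b), ⟨(hmem b).mpr hb, by simp⟩, rfl⟩
  have hperm : F.Perm s := (List.perm_ext_iff_of_nodup hFnd hsn).mpr hFmem
  rw [h1, ← hFlen, hperm.length_eq]

-- ===== VERDICT (by name: the statement is the Claim_ definition above) =====
theorem icd_counter3_spec : Claim_equal_icd_counter3 := by
  intro lls _
  unfold Spec_icd_counter3
  obtain ⟨o', e', hb, hinv⟩ := pvOuter lls PySem.Dict.empty [] []
    ⟨rfl, List.nodup_nil, List.nodup_nil, by simp,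
     by intro k c s hg; rw [PySem.Dict.get?_empty] at hg; cases hg⟩
  set dA := lls.foldl (fun d icd_list =>
      icd_list.foldl (fun d relation_start =>
        icd_list.foldl (pvStepA relation_start) d) d) PySem.Dict.empty with hdA
  obtain ⟨hko, hnd, hne, hfst, hval⟩ := hinv
  have hA : icd_counter3 lls
      = dA.keys.map (fun k => (k, (dA.getD k (0, PySem.Set.empty)).1)) := rfl
  have hB : icd_counter3_alt lls
      = o'.map (fun k => (k, (PySem.Dict.counter (e'.map (fun p => p.1))).getD k 0)) := by
    unfold icd_counter3_alt
    simp only [PySem.Set.empty]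
    rw [hb]
  rw [hA, hB, ← hko]
  apply List.map_congr_left
  intro k hk
  have hsome : ∃ c s, dA.get? k = some (c, s) := by
    cases hgk : dA.get? k with
    | none => exact absurd hk ((PySem.Dict.get?_eq_none_iff_not_mem_keys dA k).mp hgk)
    | some v =>
      obtain ⟨c0, s0⟩ := v
      exact ⟨c0, s0, rfl⟩
  obtain ⟨c, s, hg⟩ := hsome
  obtain ⟨hc, hsn, hmem⟩ := hval k c s hg
  have hgd : dA.getD k (0, PySem.Set.empty) = (c, s) := by
    rw [PySem.Dict.getD_eq_get?_getD, hg]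
    rfl
  rw [hgd, hc, PySem.Dict.getD_counter, pvCount e' k s hne hsn hmem]
  simp [PySem.Set.len]
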